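-- pv_equiv track=rewrite | github.com/m-miyawaki-m/MyJspProject | resource/python/crud_maker.py | extract_and_classify_sql
-- ===== SOURCE A (Python) =====
-- def extract_and_classify_sql(java_code):
--     queries = [line.strip() for line in java_code.splitlines() if any(op in line for op in ["SELECT", "INSERT", "UPDATE", "DELETE"])]
--     classified = {"CREATE": [], "READ": [], "UPDATE": [], "DELETE": []}
--     for query in queries:
--         if "INSERT" in query:
--             classified["CREATE"].append(query)
--         elif "SELECT" in query:
--             classified["READ"].append(query)
--         elif "UPDATE" in query:
--             classified["UPDATE"].append(query)
--         elif "DELETE" in query: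
--             classified["DELETE"].append(query)
--     return classified
-- ===== SOURCE B (Python) =====
-- def extract_and_classify_sql(java_code):
--     lines = java_code.splitlines()
--
--     def bucket(keyword, higher_priority):
--         return [line.strip() for line in lines
--                 if keyword in line and not any(h in line for h in higher_priority)]
--
--     return {"CREATE": bucket("INSERT", []),
--             "READ": bucket("SELECT", ["INSERT"]),
--             "UPDATE": bucket("UPDATE", ["INSERT", "SELECT"]),
--             "DELETE": bucket("DELETE", ["INSERT", "SELECT", "UPDATE"])}
-- ===== Notes on version B (the rewrite author's own statement) =====
-- stated objective: alternative
-- what changed: B builds the result column-wise: instead of A's row-wise classify loop mutating a shared dict, each of the four buckets is computed independently as one comprehension selecting lines that contain its keyword and none of the higher-priority keywords, and the dict is returned as a literal with no mutation.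
import Mathlib
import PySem

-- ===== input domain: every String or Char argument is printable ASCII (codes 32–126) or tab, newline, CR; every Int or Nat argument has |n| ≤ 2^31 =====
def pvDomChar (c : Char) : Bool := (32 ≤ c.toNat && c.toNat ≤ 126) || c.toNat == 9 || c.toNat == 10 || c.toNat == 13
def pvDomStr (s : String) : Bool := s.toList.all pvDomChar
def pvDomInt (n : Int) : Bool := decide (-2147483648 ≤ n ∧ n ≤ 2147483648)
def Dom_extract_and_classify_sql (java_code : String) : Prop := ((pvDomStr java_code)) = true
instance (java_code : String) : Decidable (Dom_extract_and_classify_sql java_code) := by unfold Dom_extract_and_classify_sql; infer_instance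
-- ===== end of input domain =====

-- B builds the four buckets column-wise (one independent filter per category, no dict mutation) instead of A's row-wise classify loop; objective: alternative.


-- ===== PORT A =====
def pvStepA (d : PySem.Dict String (List String)) (query : String) : PySem.Dict String (List String) :=
  if PySem.Str.isIn "INSERT" query then d.modify "CREATE" [] (· ++ [query])
  else if PySem.Str.isIn "SELECT" query then d.modify "READ" [] (· ++ [query])
  else if PySem.Str.isIn "UPDATE" query then d.modify "UPDATE" [] (· ++ [query])
  else if PySem.Str.isIn "DELETE" query then d.modify "DELETE" [] (· ++ [query])
  else d

def pvInitDict : PySem.Dict String (List String) :=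
  ((((PySem.Dict.empty).insert "CREATE" []).insert "READ" []).insert "UPDATE" []).insert "DELETE" []

def extract_and_classify_sql (java_code : String) : List (String × List String) :=
  let queries : List String :=
    ((PySem.Str.splitlines java_code).filter
      (fun line => ["SELECT", "INSERT", "UPDATE", "DELETE"].any (fun op => PySem.Str.isIn op line))).map
      PySem.Str.strip
  (queries.foldl pvStepA pvInitDict).items

-- ===== PORT B =====
def pvBucket (lines : List String) (keyword : String) (higher_priority : List String) : List String :=
  (lines.filter (fun line =>
      PySem.Str.isIn keyword line && !(higher_priority.any (fun h => PySem.Str.isIn h line)))).map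
    PySem.Str.strip

def extract_and_classify_sql_alt (java_code : String) : List (String × List String) :=
  let lines := PySem.Str.splitlines java_code
  [("CREATE", pvBucket lines "INSERT" []),
   ("READ", pvBucket lines "SELECT" ["INSERT"]),
   ("UPDATE", pvBucket lines "UPDATE" ["INSERT", "SELECT"]),
   ("DELETE", pvBucket lines "DELETE" ["INSERT", "SELECT", "UPDATE"])]

-- ===== PRECONDITION & SPEC =====
def Spec_extract_and_classify_sql (java_code : String) (out : List (String × List String)) : Prop := out = extract_and_classify_sql_alt java_code
instance (java_code : String) (out : List (String × List String)) : Decidable (Spec_extract_and_classify_sql java_code out) := by unfold Spec_extract_and_classify_sql; infer_instance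

-- ===== CLAIM (what is proved, stated in full; the proofs are below) =====
def Claim_equal_extract_and_classify_sql : Prop := ∀ (java_code : String), Dom_extract_and_classify_sql java_code → Spec_extract_and_classify_sql java_code (extract_and_classify_sql java_code)

-- ===== LEMMAS AND PROOFS =====

-- a 4-entry dict with the four category keys and given values
def pvD (a b c d : List String) : PySem.Dict String (List String) :=
  PySem.Dict.mk [("CREATE", a), ("READ", b), ("UPDATE", c), ("DELETE", d)]

lemma pvInitDict_eq : pvInitDict = pvD [] [] [] [] := by rfl

-- the per-category conditions of A's if-elif cascade (on the stripped query)
def pvCondC (q : String) : Bool := PySem.Str.isIn "INSERT" q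
def pvCondR (q : String) : Bool := !PySem.Str.isIn "INSERT" q && PySem.Str.isIn "SELECT" q
def pvCondU (q : String) : Bool :=
  !PySem.Str.isIn "INSERT" q && !PySem.Str.isIn "SELECT" q && PySem.Str.isIn "UPDATE" q
def pvCondD (q : String) : Bool :=
  !PySem.Str.isIn "INSERT" q && !PySem.Str.isIn "SELECT" q && !PySem.Str.isIn "UPDATE" q &&
    PySem.Str.isIn "DELETE" q

lemma pvStepA_pvD (a b c d : List String) (q : String) :
    pvStepA (pvD a b c d) q =
      pvD (if pvCondC q then a ++ [q] else a) (if pvCondR q then b ++ [q] else b)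
          (if pvCondU q then c ++ [q] else c) (if pvCondD q then d ++ [q] else d) := by
  unfold pvStepA pvD pvCondC pvCondR pvCondU pvCondD
  cases hI : PySem.Str.isIn "INSERT" q <;>
  cases hS : PySem.Str.isIn "SELECT" q <;>
  cases hU : PySem.Str.isIn "UPDATE" q <;>
  cases hD : PySem.Str.isIn "DELETE" q <;>
  simp [PySem.Dict.modify, PySem.Dict.insert, PySem.Dict.getD, PySem.Dict.get?,
    PySem.Dict.contains]

lemma pvFoldA (qs : List String) : ∀ (a b c d : List String),
    (qs.foldl pvStepA (pvD a b c d)).items =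
      [("CREATE", a ++ qs.filter pvCondC), ("READ", b ++ qs.filter pvCondR),
       ("UPDATE", c ++ qs.filter pvCondU), ("DELETE", d ++ qs.filter pvCondD)] := by
  induction qs with
  | nil => intro a b c d; simp [pvD]
  | cons q qs ih =>
    intro a b c d
    simp only [List.foldl_cons, pvStepA_pvD, ih, List.filter_cons]
    cases hC : pvCondC q <;> cases hR : pvCondR q <;> cases hU : pvCondU q <;> cases hD : pvCondD q <;>
      simp

-- a keyword starting with a non-whitespace char, found in a line, survives dropWhile isspace
lemma pvInfix_dropWhile {kw : List Char} {c : Char} (hc : PySem.Chars.isspace c = false)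
    (l : List Char) (h : (c :: kw) <:+: l) :
    (c :: kw) <:+: l.dropWhile PySem.Chars.isspace := by
  induction l with
  | nil => simp at h
  | cons x xs ih =>
    by_cases hx : PySem.Chars.isspace x = true
    · have hx' : (c :: kw) <:+: xs := by
        rcases h with ⟨s, t, hst⟩
        cases s with
        | nil =>
          simp only [List.nil_append, List.cons_append] at hst
          have hcx : c = x := (List.cons.injEq _ _ _ _).mp hst |>.1
          rw [← hcx] at hx; rw [hc] at hx; cases hx
        | cons y ys =>
          simp only [List.cons_append] at hst
          exact ⟨ys, t, ((List.cons.injEq _ _ _ _).mp hst).2⟩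
      simpa [List.dropWhile, hx] using ih hx'
    · simpa [List.dropWhile, hx] using h

-- a whitespace-free keyword occurs in strip(line) iff it occurs in line
lemma pvIsIn_strip (kw : List Char) (hne : kw ≠ [])
    (hsp : ∀ c ∈ kw, PySem.Chars.isspace c = false) (l : List Char) :
    PySem.Chars.isIn kw (PySem.Chars.strip l) = PySem.Chars.isIn kw l := by
  by_cases h : kw <:+: l
  · have h1 : kw <:+: PySem.Chars.lstrip l := by
      cases kw with
      | nil => exact absurd rfl hne
      | cons c cs => exact pvInfix_dropWhile (hsp c (by simp)) l h
    have h2 : kw <:+: PySem.Chars.strip l := by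
      unfold PySem.Chars.strip PySem.Chars.rstrip
      rw [← List.reverse_infix] at h1 ⊢
      simp only [List.reverse_reverse]
      obtain ⟨d, ds, hds⟩ : ∃ d ds, kw.reverse = d :: ds := by
        cases hrev : kw.reverse with
        | nil => exact absurd (by simpa using hrev) hne
        | cons d ds => exact ⟨d, ds, rfl⟩
      rw [hds] at h1 ⊢
      have hd : PySem.Chars.isspace d = false := by
        have : d ∈ kw.reverse := by rw [hds]; simp
        exact hsp d (List.mem_reverse.mp this)
      exact pvInfix_dropWhile hd _ h1
    have e1 : PySem.Chars.isIn kw (PySem.Chars.strip l) = true := by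
      rw [PySem.Chars.isIn_iff_infix]; exact h2
    have e2 : PySem.Chars.isIn kw l = true := by
      rw [PySem.Chars.isIn_iff_infix]; exact h
    rw [e1, e2]
  · have h' : ¬ kw <:+: PySem.Chars.strip l := by
      intro hcon
      apply h
      have hsub : PySem.Chars.strip l <:+: l := by
        unfold PySem.Chars.strip PySem.Chars.rstrip PySem.Chars.lstrip
        have h1 : (List.dropWhile PySem.Chars.isspace (List.dropWhile PySem.Chars.isspace l).reverse).reverse
            <:+: (List.dropWhile PySem.Chars.isspace l) := by
          rw [← List.reverse_infix]
          simp only [List.reverse_reverse]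
          exact (List.dropWhile_suffix _).isInfix
        exact h1.trans (List.dropWhile_suffix _).isInfix
      exact hcon.trans hsub
    have e1 : PySem.Chars.isIn kw (PySem.Chars.strip l) = false := by
      rw [PySem.Chars.isIn_eq_false_iff]; exact h'
    have e2 : PySem.Chars.isIn kw l = false := by
      rw [PySem.Chars.isIn_eq_false_iff]; exact h
    rw [e1, e2]

lemma pvKwIns : ("INSERT" : String).toList = ['I','N','S','E','R','T'] := rfl
lemma pvKwSel : ("SELECT" : String).toList = ['S','E','L','E','C','T'] := rfl
lemma pvKwUpd : ("UPDATE" : String).toList = ['U','P','D','A','T','E'] := rfl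
lemma pvKwDel : ("DELETE" : String).toList = ['D','E','L','E','T','E'] := rfl

lemma pvIsIn_strip_str (kw line : String) (hne : kw.toList ≠ [])
    (hsp : ∀ c ∈ kw.toList, PySem.Chars.isspace c = false) :
    PySem.Str.isIn kw (PySem.Str.strip line) = PySem.Str.isIn kw line := by
  simp only [PySem.Str.isIn_eq, PySem.Str.toList_strip]
  exact pvIsIn_strip kw.toList hne hsp line.toList

lemma pvStripI (line : String) :
    PySem.Str.isIn "INSERT" (PySem.Str.strip line) = PySem.Str.isIn "INSERT" line :=
  pvIsIn_strip_str "INSERT" line (by rw [pvKwIns]; simp)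
    (by rw [pvKwIns]; intro c hc; fin_cases hc <;> rfl)
lemma pvStripS (line : String) :
    PySem.Str.isIn "SELECT" (PySem.Str.strip line) = PySem.Str.isIn "SELECT" line :=
  pvIsIn_strip_str "SELECT" line (by rw [pvKwSel]; simp)
    (by rw [pvKwSel]; intro c hc; fin_cases hc <;> rfl)
lemma pvStripU (line : String) :
    PySem.Str.isIn "UPDATE" (PySem.Str.strip line) = PySem.Str.isIn "UPDATE" line :=
  pvIsIn_strip_str "UPDATE" line (by rw [pvKwUpd]; simp)
    (by rw [pvKwUpd]; intro c hc; fin_cases hc <;> rfl)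
lemma pvStripD (line : String) :
    PySem.Str.isIn "DELETE" (PySem.Str.strip line) = PySem.Str.isIn "DELETE" line :=
  pvIsIn_strip_str "DELETE" line (by rw [pvKwDel]; simp)
    (by rw [pvKwDel]; intro c hc; fin_cases hc <;> rfl)

-- a single category of A (filter+strip, then the cascade filter) is B's bucket
lemma pvBucketEq (lines : List String) (cond : String → Bool) (keyword : String)
    (higher_priority : List String)
    (hpt : ∀ line,
      (cond (PySem.Str.strip line) &&
        ["SELECT", "INSERT", "UPDATE", "DELETE"].any (fun op => PySem.Str.isIn op line)) =
      (PySem.Str.isIn keyword line && !(higher_priority.any (fun h => PySem.Str.isIn h line)))) :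
    ((lines.filter (fun line => ["SELECT", "INSERT", "UPDATE", "DELETE"].any
        (fun op => PySem.Str.isIn op line))).map PySem.Str.strip).filter cond =
      pvBucket lines keyword higher_priority := by
  unfold pvBucket
  rw [List.filter_map, List.filter_filter]
  congr 1
  apply List.filter_congr
  intro line _
  simp only [Function.comp_apply]
  exact hpt line

-- the four pointwise boolean identities: A's filter+cascade test equals B's bucket test
lemma pvPtC (line : String) :
    (pvCondC (PySem.Str.strip line) &&
      ["SELECT", "INSERT", "UPDATE", "DELETE"].any (fun op => PySem.Str.isIn op line)) =
    (PySem.Str.isIn "INSERT" line && !(([] : List String).any (fun h => PySem.Str.isIn h line))) := by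
  simp only [pvCondC, pvStripI, List.any_cons, List.any_nil, Bool.or_false]
  cases PySem.Str.isIn "INSERT" line <;> cases PySem.Str.isIn "SELECT" line <;>
    cases PySem.Str.isIn "UPDATE" line <;> cases PySem.Str.isIn "DELETE" line <;> rfl

lemma pvPtR (line : String) :
    (pvCondR (PySem.Str.strip line) &&
      ["SELECT", "INSERT", "UPDATE", "DELETE"].any (fun op => PySem.Str.isIn op line)) =
    (PySem.Str.isIn "SELECT" line && !(["INSERT"].any (fun h => PySem.Str.isIn h line))) := by
  simp only [pvCondR, pvStripI, pvStripS, List.any_cons, List.any_nil, Bool.or_false]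
  cases PySem.Str.isIn "INSERT" line <;> cases PySem.Str.isIn "SELECT" line <;>
    cases PySem.Str.isIn "UPDATE" line <;> cases PySem.Str.isIn "DELETE" line <;> rfl

lemma pvPtU (line : String) :
    (pvCondU (PySem.Str.strip line) &&
      ["SELECT", "INSERT", "UPDATE", "DELETE"].any (fun op => PySem.Str.isIn op line)) =
    (PySem.Str.isIn "UPDATE" line && !(["INSERT", "SELECT"].any (fun h => PySem.Str.isIn h line))) := by
  simp only [pvCondU, pvStripI, pvStripS, pvStripU, List.any_cons, List.any_nil, Bool.or_false]
  cases PySem.Str.isIn "INSERT" line <;> cases PySem.Str.isIn "SELECT" line <;>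
    cases PySem.Str.isIn "UPDATE" line <;> cases PySem.Str.isIn "DELETE" line <;> rfl

lemma pvPtD (line : String) :
    (pvCondD (PySem.Str.strip line) &&
      ["SELECT", "INSERT", "UPDATE", "DELETE"].any (fun op => PySem.Str.isIn op line)) =
    (PySem.Str.isIn "DELETE" line &&
      !(["INSERT", "SELECT", "UPDATE"].any (fun h => PySem.Str.isIn h line))) := by
  simp only [pvCondD, pvStripI, pvStripS, pvStripU, pvStripD, List.any_cons, List.any_nil,
    Bool.or_false]
  cases PySem.Str.isIn "INSERT" line <;> cases PySem.Str.isIn "SELECT" line <;>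
    cases PySem.Str.isIn "UPDATE" line <;> cases PySem.Str.isIn "DELETE" line <;> rfl

-- ===== VERDICT (by name: the statement is the Claim_ definition above) =====
theorem extract_and_classify_sql_spec : Claim_equal_extract_and_classify_sql := by
  intro java_code _
  unfold Spec_extract_and_classify_sql
  simp only [extract_and_classify_sql, extract_and_classify_sql_alt]
  rw [pvInitDict_eq, pvFoldA]
  simp only [List.nil_append]
  rw [pvBucketEq _ pvCondC "INSERT" [] pvPtC, pvBucketEq _ pvCondR "SELECT" ["INSERT"] pvPtR,
    pvBucketEq _ pvCondU "UPDATE" ["INSERT", "SELECT"] pvPtU,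
    pvBucketEq _ pvCondD "DELETE" ["INSERT", "SELECT", "UPDATE"] pvPtD]
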